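-- pv_equiv track=rewrite | github.com/jprichards779/My-First-Big-Project- | Creating Very Basic 3D Graphics From Scratch/packages/array_functions.py | shed_weight2
-- ===== SOURCE A (Python) =====
-- def shed_weight2(M, P):
--     if type(M) == tuple:
--         M = list(M)
--     out = M
--     for n in P:
--         if n in out:
--             out.remove(n)
--         else: out.append(n)
--     return out
-- ===== SOURCE B (Python) =====
-- def shed_weight2(M, P):
--     if type(M) == tuple:
--         M = list(M)
--     # items: every element ever present, with an alive flag; per-value FIFO of
--     # item indices (q[v] = all indices ever pushed for v, heads[v] = how many popped).
--     items = [[v, True] for v in M]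
--     q = {}
--     for i, v in enumerate(M):
--         q.setdefault(v, []).append(i)
--     heads = {}
--     for n in P:
--         lst = q.get(n)
--         h = heads.get(n, 0)
--         if lst is not None and h < len(lst):
--             items[lst[h]][1] = False
--             heads[n] = h + 1
--         else:
--             q.setdefault(n, []).append(len(items))
--             items.append([n, True])
--     return [v for v, alive in items if alive]
-- ===== Notes on version B (the rewrite author's own statement) =====
-- stated objective: faster
-- what changed: Instead of rescanning the current list for membership and first-occurrence removal on every element of P, B keeps every element ever present with an alive flag plus a per-value FIFO of item indices with a popped-count pointer, processing each toggle in O(1) and compacting once at the end (return value only: A mutates M in place, B does not).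
import Mathlib
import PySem

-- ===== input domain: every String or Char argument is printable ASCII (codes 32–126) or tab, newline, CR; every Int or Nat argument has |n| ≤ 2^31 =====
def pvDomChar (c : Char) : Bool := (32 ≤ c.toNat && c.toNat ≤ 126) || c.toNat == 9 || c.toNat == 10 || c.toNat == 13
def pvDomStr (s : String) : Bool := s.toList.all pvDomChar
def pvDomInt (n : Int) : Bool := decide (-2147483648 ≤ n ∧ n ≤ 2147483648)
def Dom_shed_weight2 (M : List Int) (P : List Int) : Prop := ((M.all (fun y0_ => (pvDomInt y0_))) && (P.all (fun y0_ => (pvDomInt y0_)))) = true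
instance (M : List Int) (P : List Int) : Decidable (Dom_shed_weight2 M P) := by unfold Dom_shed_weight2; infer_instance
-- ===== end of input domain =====

-- B replaces A's O(|M|·|P|) rescans (membership + remove) by one pass with per-value FIFO
-- index queues and alive flags (return-value equivalence: Python A mutates M in place, B does not).


-- ===== PORT A =====
-- for n in P: if n in out: out.remove(n) else: out.append(n)
-- (M is a list under the type convention, so the tuple branch never fires; `.getD out`
--  only totalises remove?, which is `some` whenever the branch is taken)
def shed_weight2 (M : List Int) (P : List Int) : List Int :=
  P.foldl (fun out n =>
    if n ∈ out then (PySem.List.remove? out n).getD out else out ++ [n]) M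

-- ===== PORT B =====
-- B's state: items = every element ever present with an alive flag;
-- q[v] = all item indices ever pushed for value v (Nat in Lean: Python's list indices
-- are the nonnegative ints produced by enumerate/len); heads[v] = how many were popped.
def pvAltStep (s : List (Int × Bool) × PySem.Dict Int (List Nat) × PySem.Dict Int Nat)
    (n : Int) : List (Int × Bool) × PySem.Dict Int (List Nat) × PySem.Dict Int Nat :=
  let items := s.1
  let q := s.2.1
  let heads := s.2.2
  let lst := q.getD n []
  let h := heads.getD n 0
  if h < lst.length then
    (items.set (lst.getD h 0) (n, false), q, heads.insert n (h + 1))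
  else
    (items ++ [(n, true)], q.insert n (lst ++ [items.length]), heads)

-- for i, v in enumerate(M): q.setdefault(v, []).append(i)
def pvBuildQ (M : List Int) : PySem.Dict Int (List Nat) :=
  (M.zipIdx).foldl (fun q p => q.insert p.1 (q.getD p.1 [] ++ [p.2])) PySem.Dict.empty

def shed_weight2_alt (M : List Int) (P : List Int) : List Int :=
  let items0 := M.map (fun v => (v, true))
  let s := P.foldl pvAltStep (items0, pvBuildQ M, PySem.Dict.empty)
  s.1.filterMap (fun p => if p.2 then some p.1 else none)

-- ===== PRECONDITION & SPEC =====
def Spec_shed_weight2 (M : List Int) (P : List Int) (out : List Int) : Prop := out = shed_weight2_alt M P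
instance (M : List Int) (P : List Int) (out : List Int) : Decidable (Spec_shed_weight2 M P out) := by unfold Spec_shed_weight2; infer_instance

-- ===== CLAIM (what is proved, stated in full; the proofs are below) =====
def Claim_equal_shed_weight2 : Prop := ∀ (M : List Int) (P : List Int), Dom_shed_weight2 M P → Spec_shed_weight2 M P (shed_weight2 M P)

-- ===== LEMMAS AND PROOFS =====

-- the visible list encoded by B's items
def pvAlive (items : List (Int × Bool)) : List Int :=
  items.filterMap (fun p => if p.2 then some p.1 else none)

-- indices of alive entries holding value v, in increasing order
def pvAliveIdx : List (Int × Bool) → Int → List Nat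
  | [], _ => []
  | (w, b) :: t, v => (if b = true ∧ w = v then [0] else []) ++ (pvAliveIdx t v).map (· + 1)

theorem pvAlive_cons (w : Int) (b : Bool) (t : List (Int × Bool)) :
    pvAlive ((w, b) :: t) = (if b then [w] else []) ++ pvAlive t := by
  cases b <;> simp [pvAlive]

theorem pvMem_alive_iff (items : List (Int × Bool)) (n : Int) :
    n ∈ pvAlive items ↔ pvAliveIdx items n ≠ [] := by
  induction items with
  | nil => simp [pvAlive, pvAliveIdx]
  | cons p t ih =>
    obtain ⟨w, b⟩ := p
    rw [pvAlive_cons]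
    by_cases hw : w = n
    · subst hw; cases b <;> simp [pvAliveIdx, ih]
    · cases b <;> simp [pvAliveIdx, hw, Ne.symm hw, ih]

theorem pvAlive_append_one (items : List (Int × Bool)) (n : Int) :
    pvAlive (items ++ [(n, true)]) = pvAlive items ++ [n] := by
  simp [pvAlive]

theorem pvAliveIdx_append_one (items : List (Int × Bool)) (n v : Int) :
    pvAliveIdx (items ++ [(n, true)]) v
      = pvAliveIdx items v ++ (if v = n then [items.length] else []) := by
  induction items with
  | nil =>
    by_cases h : v = n
    · subst h; simp [pvAliveIdx]
    · simp [pvAliveIdx, h, Ne.symm h]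
  | cons p t ih =>
    obtain ⟨w, b⟩ := p
    simp only [List.cons_append, pvAliveIdx, ih]
    by_cases h : v = n <;> simp [h]

-- popping the leftmost alive index of value n: effect on the visible list
theorem pvAlive_set (items : List (Int × Bool)) (n : Int) (i : Nat) (rest : List Nat)
    (hidx : pvAliveIdx items n = i :: rest) :
    pvAlive (items.set i (n, false)) = (pvAlive items).erase n := by
  induction items generalizing i rest with
  | nil => simp [pvAliveIdx] at hidx
  | cons p t ih =>
    obtain ⟨w, b⟩ := p
    by_cases hh : b = true ∧ w = n
    · obtain ⟨hb, hw⟩ := hh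
      subst hb; subst hw
      simp [pvAliveIdx] at hidx
      rw [← hidx.1]
      simp [pvAlive_cons, List.erase_cons_head]
    · have hidx' : (pvAliveIdx t n).map (· + 1) = i :: rest := by
        simpa [pvAliveIdx, hh] using hidx
      rw [List.map_eq_cons_iff] at hidx'
      obtain ⟨i', rest', ht, hi, hrest⟩ := hidx'
      subst hi
      rw [show (i' + 1 : Nat) = i' + 1 from rfl]
      simp only [List.set_cons_succ]
      rw [pvAlive_cons, pvAlive_cons, ih i' rest' ht]
      cases b with
      | false => simp
      | true =>
        have hw : w ≠ n := fun h => hh ⟨rfl, h⟩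
        simp [List.erase_cons_tail, hw]

theorem pvAliveIdx_set_self (items : List (Int × Bool)) (n : Int) (i : Nat) (rest : List Nat)
    (hidx : pvAliveIdx items n = i :: rest) :
    pvAliveIdx (items.set i (n, false)) n = rest := by
  induction items generalizing i rest with
  | nil => simp [pvAliveIdx] at hidx
  | cons p t ih =>
    obtain ⟨w, b⟩ := p
    by_cases hh : b = true ∧ w = n
    · obtain ⟨hb, hw⟩ := hh
      subst hb; subst hw
      simp [pvAliveIdx] at hidx
      rw [← hidx.1]
      simp [pvAliveIdx, ← hidx.2]
    · have hidx' : (pvAliveIdx t n).map (· + 1) = i :: rest := by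
        simpa [pvAliveIdx, hh] using hidx
      rw [List.map_eq_cons_iff] at hidx'
      obtain ⟨i', rest', ht, hi, hrest⟩ := hidx'
      subst hi
      simp only [List.set_cons_succ]
      simp [pvAliveIdx, hh, ih i' rest' ht, hrest]

theorem pvAliveIdx_set_ne (items : List (Int × Bool)) (n v : Int) (i : Nat) (rest : List Nat)
    (hv : v ≠ n) (hidx : pvAliveIdx items n = i :: rest) :
    pvAliveIdx (items.set i (n, false)) v = pvAliveIdx items v := by
  induction items generalizing i rest with
  | nil => simp [pvAliveIdx] at hidx
  | cons p t ih =>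
    obtain ⟨w, b⟩ := p
    by_cases hh : b = true ∧ w = n
    · obtain ⟨hb, hw⟩ := hh
      subst hb; subst hw
      simp [pvAliveIdx] at hidx
      rw [← hidx.1]
      simp [pvAliveIdx, (Ne.symm hv)]
    · have hidx' : (pvAliveIdx t n).map (· + 1) = i :: rest := by
        simpa [pvAliveIdx, hh] using hidx
      rw [List.map_eq_cons_iff] at hidx'
      obtain ⟨i', rest', ht, hi, hrest⟩ := hidx'
      subst hi
      simp only [List.set_cons_succ]
      simp [pvAliveIdx, ih i' rest' ht]

-- B's loop invariant
def pvInv (items : List (Int × Bool)) (q : PySem.Dict Int (List Nat))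
    (heads : PySem.Dict Int Nat) : Prop :=
  ∀ v : Int, pvAliveIdx items v = (q.getD v []).drop (heads.getD v 0)
    ∧ heads.getD v 0 ≤ (q.getD v []).length

theorem pvStep_ok (items : List (Int × Bool)) (q : PySem.Dict Int (List Nat))
    (heads : PySem.Dict Int Nat) (n : Int) (hInv : pvInv items q heads) :
    pvAlive (pvAltStep (items, q, heads) n).1
      = (if n ∈ pvAlive items
          then (PySem.List.remove? (pvAlive items) n).getD (pvAlive items)
          else pvAlive items ++ [n])
    ∧ pvInv (pvAltStep (items, q, heads) n).1 (pvAltStep (items, q, heads) n).2.1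
        (pvAltStep (items, q, heads) n).2.2 := by
  obtain ⟨hq, hlen⟩ := hInv n
  by_cases hcond : heads.getD n 0 < (q.getD n []).length
  · -- pop branch
    have hne : (q.getD n []).drop (heads.getD n 0) ≠ [] := by
      intro h; rw [List.drop_eq_nil_iff] at h; omega
    rw [← hq] at hne
    obtain ⟨i, rest, hidx⟩ : ∃ i rest, pvAliveIdx items n = i :: rest := by
      cases h : pvAliveIdx items n with
      | nil => exact absurd h hne
      | cons a l => exact ⟨a, l, rfl⟩
    have hmem : n ∈ pvAlive items := (pvMem_alive_iff items n).2 (by rw [hidx]; simp)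
    have hgetd : (q.getD n []).getD (heads.getD n 0) 0 = i := by
      have : (q.getD n []).drop (heads.getD n 0) = i :: rest := by rw [← hq, hidx]
      have h0 : ((q.getD n []).drop (heads.getD n 0)).getD 0 0 = i := by rw [this]; rfl
      rwa [List.getD_eq_getElem?_getD, List.getElem?_drop, Nat.add_zero,
        ← List.getD_eq_getElem?_getD] at h0
    have hrm : (PySem.List.remove? (pvAlive items) n).getD (pvAlive items)
        = (pvAlive items).erase n := by
      rw [PySem.List.remove?_eq_some_erase (pvAlive items) n hmem]; rfl
    simp only [pvAltStep, if_pos hcond, hgetd]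
    refine ⟨?_, ?_⟩
    · rw [if_pos hmem, hrm, pvAlive_set items n i rest hidx]
    · intro v
      by_cases hv : v = n
      · subst hv
        rw [pvAliveIdx_set_self items v i rest hidx]
        constructor
        · rw [PySem.Dict.getD_insert_self, List.drop_add_one_eq_tail_drop, ← hq, hidx, List.tail_cons]
        · rw [PySem.Dict.getD_insert_self]; omega
      · obtain ⟨hq', hlen'⟩ := hInv v
        rw [pvAliveIdx_set_ne items n v i rest hv hidx,
          PySem.Dict.getD_insert_of_ne heads _ _ hv]
        exact ⟨hq', hlen'⟩
  · -- append branch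
    have hempty : pvAliveIdx items n = [] := by
      rw [hq, List.drop_eq_nil_iff]; omega
    have hmem : n ∉ pvAlive items := fun h => (pvMem_alive_iff items n).1 h hempty
    have hfull : heads.getD n 0 = (q.getD n []).length := by omega
    simp only [pvAltStep, if_neg hcond]
    refine ⟨?_, ?_⟩
    · rw [if_neg hmem, pvAlive_append_one]
    · intro v
      rw [pvAliveIdx_append_one]
      by_cases hv : v = n
      · subst hv
        rw [PySem.Dict.getD_insert_self, hempty, if_pos rfl, List.nil_append, hfull,
          List.drop_left]
        constructor
        · rfl
        · simp
      · obtain ⟨hq', hlen'⟩ := hInv v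
        rw [PySem.Dict.getD_insert_of_ne q _ _ hv, if_neg hv, List.append_nil]
        exact ⟨hq', hlen'⟩

theorem pvFold_ok (P : List Int) (items : List (Int × Bool)) (q : PySem.Dict Int (List Nat))
    (heads : PySem.Dict Int Nat) (hInv : pvInv items q heads) :
    pvAlive (P.foldl pvAltStep (items, q, heads)).1
      = P.foldl (fun out n =>
          if n ∈ out then (PySem.List.remove? out n).getD out else out ++ [n])
        (pvAlive items) := by
  induction P generalizing items q heads with
  | nil => rfl
  | cons n P ih =>
    obtain ⟨hstep, hinv'⟩ := pvStep_ok items q heads n hInv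
    simp only [List.foldl_cons]
    have : pvAltStep (items, q, heads) n
        = ((pvAltStep (items, q, heads) n).1, (pvAltStep (items, q, heads) n).2.1,
           (pvAltStep (items, q, heads) n).2.2) := rfl
    rw [this, ih _ _ _ hinv', hstep]

theorem pvBuildQ_getD (M : List Int) (v : Int) :
    (pvBuildQ M).getD v [] = pvAliveIdx (M.map (fun x => (x, true))) v := by
  induction M using List.reverseRecOn with
  | nil => simp [pvBuildQ, pvAliveIdx]
  | append_singleton t x ih =>
    rw [show pvBuildQ (t ++ [x])
        = (pvBuildQ t).insert x ((pvBuildQ t).getD x [] ++ [t.length]) by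
      simp [pvBuildQ, List.zipIdx_append, List.foldl_append]]
    rw [List.map_append, List.map_singleton, pvAliveIdx_append_one]
    by_cases hv : v = x
    · subst hv
      rw [PySem.Dict.getD_insert_self, ih, if_pos rfl]
      simp
    · rw [PySem.Dict.getD_insert_of_ne (pvBuildQ t) _ _ hv, ih, if_neg hv,
        List.append_nil]

theorem pvInit_inv (M : List Int) :
    pvInv (M.map (fun v => (v, true))) (pvBuildQ M) PySem.Dict.empty := by
  intro v
  rw [pvBuildQ_getD]
  constructor
  · rfl
  · exact Nat.zero_le _

theorem pvAlive_init (M : List Int) : pvAlive (M.map (fun v => (v, true))) = M := by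
  simp [pvAlive, List.filterMap_map]

-- ===== VERDICT (by name: the statement is the Claim_ definition above) =====
theorem shed_weight2_spec : Claim_equal_shed_weight2 := by
  intro M P _
  show shed_weight2 M P = shed_weight2_alt M P
  have h := pvFold_ok P (M.map (fun v => (v, true))) (pvBuildQ M) PySem.Dict.empty
    (pvInit_inv M)
  rw [pvAlive_init] at h
  exact h.symm
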